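-- pv_equiv track=rewrite | github.com/lsh0107/solving_algorithms | 프로그래머스/1/17681. ［1차］ 비밀지도/［1차］ 비밀지도.py | solution
-- ===== SOURCE A (Python) =====
-- def solution(n, arr1, arr2):
--     answer = []
--     num = 0
--     map1 = []
--     map2 = []
--     for i in arr1:
--         temp = []
--         for j in range(n):
--             num = divmod(i, 2)
--             i = num[0]
--             temp.append(num[1])
--         map1.append(temp[::-1])
--
--     for i in arr2:
--         temp = []
--         for j in range(n):
--             num = divmod(i, 2)
--             i = num[0]
--             temp.append(num[1])
--         map2.append(temp[::-1])
--
--     for k in range(n):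
--         temp = ''
--         for l in range(n):
--             if map1[k][l] == 1 or map2[k][l] == 1:
--                 temp += '#'
--             else:
--                 temp += ' '
--         answer.append(temp)
--     return answer
-- ===== SOURCE B (Python) =====
-- def solution(n, arr1, arr2):
--     # One pass: per row, OR the two numbers, mask to the low n bits, format as a
--     # zero-padded binary string and map digits to '#'/' '.
--     return [''.join('#' if c == '1' else ' '
--                     for c in format((arr1[i] | arr2[i]) & ((1 << n) - 1), '0{}b'.format(n)))
--             for i in range(n)]
-- ===== Notes on version B (the rewrite author's own statement) =====
-- stated objective: idiomatic
-- what changed: B drops A's two intermediate divmod-built bit matrices and, in one pass over the rows, ORs the two numbers, masks to the low n bits and formats the result as a zero-padded binary string translated to '#'/' '; the per-bit Python divmod loops are replaced by single C-level bigint operations.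
-- outside the precondition, e.g. on solution(1, [1, 1], []): A returns ['#'], B raises IndexError
import Mathlib
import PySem

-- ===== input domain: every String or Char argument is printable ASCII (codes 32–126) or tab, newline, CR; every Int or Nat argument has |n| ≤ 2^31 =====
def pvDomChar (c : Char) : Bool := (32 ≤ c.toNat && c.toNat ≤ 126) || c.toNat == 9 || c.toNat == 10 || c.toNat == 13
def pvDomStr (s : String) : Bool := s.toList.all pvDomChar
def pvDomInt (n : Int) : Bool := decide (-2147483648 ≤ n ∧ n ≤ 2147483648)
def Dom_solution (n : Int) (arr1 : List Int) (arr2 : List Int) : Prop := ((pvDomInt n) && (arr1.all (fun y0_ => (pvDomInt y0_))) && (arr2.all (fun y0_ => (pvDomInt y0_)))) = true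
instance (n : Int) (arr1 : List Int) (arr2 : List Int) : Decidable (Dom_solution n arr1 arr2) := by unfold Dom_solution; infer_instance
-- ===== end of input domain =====

-- B replaces A's two divmod-built bit matrices by per-row integer OR + masked binary formatting (objective: simpler).

-- ===== PORT A =====
-- the repeated 'temp = []; for j in range(n): num = divmod(i,2); i = num[0]; temp.append(num[1])'
-- block of A (identical for arr1 and arr2); divisor is the literal 2 ≠ 0, so divmod is exact
def pvBitRow (n : Int) (i0 : Int) : List Int :=
  ((PySem.List.pyRange 0 n 1).foldl
     (fun (st : Int × List Int) _ =>
        let num := (PySem.Int.floordiv st.1 2, PySem.Int.mod st.1 2)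
        (num.1, st.2 ++ [num.2])) (i0, ([] : List Int))).2

def solution (n : Int) (arr1 : List Int) (arr2 : List Int) : List String :=
  let answer : List String := []
  -- 'num = 0' only initialises the loop temporary; 'temp[::-1]' is slice? with step -1
  let map1 := arr1.foldl (fun map1 i =>
      map1 ++ [(PySem.List.slice? (pvBitRow n i) none none (-1)).getD []]) []
  let map2 := arr2.foldl (fun map2 i =>
      map2 ++ [(PySem.List.slice? (pvBitRow n i) none none (-1)).getD []]) []
  (PySem.List.pyRange 0 n 1).foldl (fun answer k =>
    let temp := (PySem.List.pyRange 0 n 1).foldl (fun temp l =>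
      -- map1[k][l]: pyGetD defaults are never taken under Pre_solution (indices in range)
      if (PySem.List.pyGetD (PySem.List.pyGetD map1 k []) l 0 == 1)
         || (PySem.List.pyGetD (PySem.List.pyGetD map2 k []) l 0 == 1)
      then temp ++ "#" else temp ++ " ") ""
    answer ++ [temp]) answer

-- ===== PORT B =====
-- hand port of format(v, 'b') for v > 0: big-endian binary digits, low bit produced last
def pvBin (v : Nat) : List Char :=
  if _h : v = 0 then [] else pvBin (v / 2) ++ [if v % 2 = 1 then '1' else '0']
decreasing_by exact Nat.div_lt_self (Nat.pos_of_ne_zero _h) one_lt_two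

def solution_alt (n : Int) (arr1 : List Int) (arr2 : List Int) : List String :=
  (PySem.List.pyRange 0 n 1).map (fun i =>
    -- arr1[i] | arr2[i], masked to the low n bits (pyGetD defaults never taken under Pre_solution)
    let v := PySem.Int.band
               (PySem.Int.bor (PySem.List.pyGetD arr1 i 0) (PySem.List.pyGetD arr2 i 0))
               ((1 <<< n.toNat) - 1)
    -- format(v, '0{n}b') : digits of v (v ≥ 0 after masking), zero-padded to width n
    let digits := if v = 0 then ['0'] else pvBin v.toNat
    let padded := List.replicate (n.toNat - digits.length) '0' ++ digits
    String.ofList (padded.map (fun c => if c = '1' then '#' else ' ')))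

-- ===== PRECONDITION & SPEC =====
-- Pre_ excludes inputs where 0 < n exceeds a list's length: there A raises IndexError on map1[k] /
-- map2[k][l] — except that 'or' short-circuiting lets A return when every consulted map1 bit is 1
-- and only arr2 is short; B reads both rows unconditionally and raises IndexError on all of them.
def Pre_solution (n : Int) (arr1 : List Int) (arr2 : List Int) : Prop :=
  0 < n → (n ≤ (arr1.length : Int) ∧ n ≤ (arr2.length : Int))
instance (n : Int) (arr1 : List Int) (arr2 : List Int) : Decidable (Pre_solution n arr1 arr2) := by
  unfold Pre_solution; infer_instance

def pvWitness_solution : Int × List Int × List Int := (2, ([9, 20], [30, 1]))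

def Spec_solution (n : Int) (arr1 : List Int) (arr2 : List Int) (out : List String) : Prop := out = solution_alt n arr1 arr2
instance (n : Int) (arr1 : List Int) (arr2 : List Int) (out : List String) : Decidable (Spec_solution n arr1 arr2 out) := by unfold Spec_solution; infer_instance

-- ===== CLAIM (what is proved, stated in full; the proofs are below) =====
def Claim_equal_solution : Prop := ∀ (n : Int) (arr1 : List Int) (arr2 : List Int), Dom_solution n arr1 arr2 → Pre_solution n arr1 arr2 → Spec_solution n arr1 arr2 (solution n arr1 arr2)

-- ===== LEMMAS AND PROOFS =====

-- the value of A's divmod loop, written as a structural recursion (low bit first)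
def pvLow : Nat → Int → List Int
  | 0, _ => []
  | m + 1, i => PySem.Int.mod i 2 :: pvLow m (PySem.Int.floordiv i 2)

-- the same at Nat level
def pvLowN : Nat → Nat → List Int
  | 0, _ => []
  | m + 1, x => ((x % 2 : Nat) : Int) :: pvLowN m (x / 2)

theorem pvLoop_eq (l : List Int) : ∀ (i : Int) (acc : List Int),
    (l.foldl (fun (st : Int × List Int) _ =>
        let num := (PySem.Int.floordiv st.1 2, PySem.Int.mod st.1 2)
        (num.1, st.2 ++ [num.2])) (i, acc)).2 = acc ++ pvLow l.length i := by
  induction l with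
  | nil => intro i acc; simp [pvLow]
  | cons x l ih =>
      intro i acc
      simp only [List.foldl_cons, List.length_cons, pvLow]
      rw [ih]
      simp

theorem pvBitRow_eq (n : Int) (i : Int) : pvBitRow n i = pvLow (n.toNat) i := by
  unfold pvBitRow
  rw [pvLoop_eq]
  simp [PySem.List.length_pyRange_one]

theorem pvLow_eq_pvLowN : ∀ (m : Nat) (i : Int),
    pvLow m i = pvLowN m ((i % ((2 ^ m : Nat) : Int)).toNat) := by
  intro m
  induction m with
  | zero => intro i; simp [pvLow, pvLowN]
  | succ m ih =>
      intro i
      have h2 : ((2 ^ (m+1) : Nat) : Int) = 2 * ((2 ^ m : Nat) : Int) := by push_cast [pow_succ]; ring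
      set p : Int := ((2 ^ m : Nat) : Int) with hpdef
      have hppos : (0:Int) < p := by positivity
      have hr0 : 0 ≤ i % (2 * p) := Int.emod_nonneg i (by omega)
      have hrlt : i % (2 * p) < 2 * p := Int.emod_lt_of_pos i (by omega)
      have hi : i = i % (2 * p) + 2 * p * (i / (2 * p)) := by
        have := Int.emod_add_mul_ediv i (2 * p); omega
      simp only [pvLow, pvLowN, h2]
      have hX2 : i % 2 = (i % (2 * p)) % 2 := by
        conv_lhs => rw [hi]
        rw [mul_assoc, Int.add_mul_emod_self_left]
      congr 1
      · -- low bit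
        rw [PySem.Int.mod_eq_emod_of_pos (by omega : (0:Int) < 2)]
        omega
      · -- tail
        rw [ih]
        congr 1
        rw [PySem.Int.floordiv_eq_ediv_of_pos (by omega : (0:Int) < 2)]
        have hdiv : i / 2 = i % (2 * p) / 2 + p * (i / (2 * p)) := by
          conv_lhs => rw [hi]
          rw [show 2 * p * (i / (2 * p)) = p * (i / (2 * p)) * 2 by ring,
            Int.add_mul_ediv_right _ _ (by omega : (2:Int) ≠ 0)]
        rw [hdiv, Int.add_mul_emod_self_left,
          Int.emod_eq_of_lt (by omega) (by omega)]
        omega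

theorem pvLowN_testBit : ∀ (m : Nat) (x : Nat),
    pvLowN m x = (List.range m).map (fun j => if x.testBit j then (1 : Int) else 0) := by
  intro m
  induction m with
  | zero => intro x; simp [pvLowN]
  | succ m ih =>
      intro x
      rw [List.range_succ_eq_map]
      simp only [pvLowN, List.map_cons, List.map_map]
      congr 1
      · rw [Nat.testBit_zero]
        rcases Nat.mod_two_eq_zero_or_one x with h | h <;> simp [h]
      · rw [ih]
        apply List.map_congr_left
        intro j _
        simp [Function.comp, Nat.testBit_succ]

-- reversing a map over range reads the indices back to front
theorem pvReverseMapRange {α : Type} (m : Nat) (f : Nat → α) :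
    ((List.range m).map f).reverse = (List.range m).map (fun l => f (m - 1 - l)) := by
  apply List.ext_getElem
  · simp
  · intro k h1 h2
    simp only [List.getElem_reverse, List.getElem_map, List.getElem_range,
      List.length_map, List.length_range] at *

-- disjoint bitwise or is addition
theorem pvLorAdd : ∀ (a b : Nat), a &&& b = 0 → a ||| b = a + b := by
  intro a
  induction a using Nat.binaryRec with
  | zero => intro b _; simp
  | bit xb xn ih =>
      intro b h
      induction b using Nat.bitCasesOn with
      | bit yb yn =>
        rw [Nat.land_bit] at h
        rw [Nat.lor_bit]
        rcases Nat.bit_eq_zero_iff.mp h with ⟨h1, h2⟩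
        rw [ih _ h1]
        simp only [Nat.bit_val]
        cases xb <;> cases yb <;> simp_all <;> omega

theorem pvSubAnd (x y : Nat) : x - (x &&& y) = Nat.ldiff x y := by
  have hand : (x &&& y) &&& Nat.ldiff x y = 0 := by
    apply Nat.eq_of_testBit_eq
    intro i
    simp only [Nat.testBit_land, Nat.testBit_ldiff, Nat.zero_testBit]
    cases x.testBit i <;> cases y.testBit i <;> rfl
  have hor : (x &&& y) ||| Nat.ldiff x y = x := by
    apply Nat.eq_of_testBit_eq
    intro i
    simp only [Nat.testBit_lor, Nat.testBit_land, Nat.testBit_ldiff]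
    cases x.testBit i <;> cases y.testBit i <;> rfl
  have := pvLorAdd _ _ hand
  omega

-- emod of a negative number by p, in Nat terms
theorem pvNegEmod (A p : Nat) (hp : 0 < p) :
    ((-(A:Int) - 1) % ((p:Nat):Int)).toNat = p - 1 - A % p := by
  have hr : A % p < p := Nat.mod_lt _ hp
  have heq : A % p + p * (A / p) = A := Nat.mod_add_div A p
  have hrw : (-(A:Int) - 1) = ((p - 1 - A % p : Nat) : Int) + ((p:Nat):Int) * (-(((A / p : Nat):Int)) - 1) := by
    push_cast [Nat.cast_sub (by omega : A % p ≤ p - 1), Nat.cast_sub (by omega : 1 ≤ p)]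
    nlinarith [heq]
  rw [hrw, Int.add_mul_emod_self_left,
    Int.emod_eq_of_lt (by positivity) (by exact_mod_cast (by omega : (p - 1 - A % p) < p))]
  simp

-- length bound for pvBin
theorem pvBin_length_le : ∀ (m : Nat) (x : Nat), x < 2 ^ m → (pvBin x).length ≤ m := by
  intro m
  induction m with
  | zero => intro x hx; interval_cases x; rw [pvBin]; simp
  | succ m ih =>
      intro x hx
      by_cases hx0 : x = 0
      · subst hx0; rw [pvBin]; simp
      · rw [pvBin, dif_neg hx0]
        have : x / 2 < 2 ^ m := by
          have : (2:Nat) ^ (m+1) = 2 * 2 ^ m := by ring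
          omega
        have := ih _ this
        simp [List.length_append]
        omega

-- padded binary digits are the big-endian testBit map
theorem pvPad : ∀ (m : Nat) (x : Nat), x < 2 ^ m →
    List.replicate (m - (pvBin x).length) '0' ++ pvBin x =
      (List.range m).map (fun l => if x.testBit (m - 1 - l) then '1' else '0') := by
  intro m
  induction m with
  | zero => intro x hx; interval_cases x; rw [pvBin]; simp
  | succ m ih =>
      intro x hx
      by_cases hx0 : x = 0
      · subst hx0
        rw [pvBin]
        simp [Nat.zero_testBit, List.map_const']
      · conv_lhs => rw [pvBin, dif_neg hx0]
        have hx2 : x / 2 < 2 ^ m := by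
          have : (2:Nat) ^ (m+1) = 2 * 2 ^ m := by ring
          omega
        have hlen : (pvBin (x/2)).length ≤ m := pvBin_length_le m _ hx2
        have hlenx : (pvBin x).length = (pvBin (x/2)).length + 1 := by
          conv_lhs => rw [pvBin, dif_neg hx0]
          simp
        have hfront : (List.range m).map (fun l => if x.testBit (m + 1 - 1 - l) then '1' else '0')
            = (List.range m).map (fun l => if (x / 2).testBit (m - 1 - l) then '1' else '0') := by
          apply List.map_congr_left
          intro l hl
          rw [List.mem_range] at hl
          rw [show m + 1 - 1 - l = (m - 1 - l) + 1 by omega, Nat.testBit_succ]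
        conv_rhs => rw [List.range_succ, List.map_append, List.map_singleton, hfront]

        rw [show (pvBin (x / 2) ++ [if x % 2 = 1 then '1' else '0']).length = (pvBin (x/2)).length + 1 by simp]
        rw [show m + 1 - ((pvBin (x/2)).length + 1) = m - (pvBin (x/2)).length by omega]
        rw [← List.append_assoc]
        congr 2
        · exact ih _ hx2
        · rw [show m + 1 - 1 - m = 0 by omega, Nat.testBit_zero]
          rcases Nat.mod_two_eq_zero_or_one x with h | h <;> simp [h]

-- A's string-building inner loop produces the mapped character list
theorem pvStrLoopAux (cond : Nat → Bool) : ∀ (m : Nat),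
    (List.range m).foldl (fun temp l => if cond l then temp ++ "#" else temp ++ " ") "" =
      String.ofList ((List.range m).map (fun l => if cond l then '#' else ' ')) := by
  intro m
  induction m with
  | zero => rfl
  | succ m ih =>
      rw [List.range_succ, List.foldl_append, List.map_append, ih]
      simp only [List.foldl_cons, List.foldl_nil, List.map_cons, List.map_nil]
      split_ifs <;> rw [String.ofList_append]

theorem pvStrLoop (m : Nat) (cond : Int → Bool) :
    (PySem.List.pyRange 0 (m : Int) 1).foldl
        (fun temp l => if cond l then temp ++ "#" else temp ++ " ") "" =
      String.ofList (List.map (fun (l : Nat) => if cond (l : Int) then '#' else ' ') (List.range m)) := by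
  rw [PySem.List.pyRange_one]
  simp only [Int.sub_zero, Int.toNat_natCast, List.foldl_map, zero_add]
  exact pvStrLoopAux (fun l => cond (l : Int)) m

-- getD through map, under an index bound
theorem pvGetDMap {α β : Type} (f : α → β) (l : List α) (j : Nat) (d : β) (h : j < l.length) :
    (l.map f).getD j d = f l[j] := by
  rw [List.getD_eq_getElem _ _ (by simpa using h)]
  simp

theorem pvGetDMapRange {α : Type} (g : Nat → α) (m j : Nat) (d : α) (h : j < m) :
    ((List.range m).map g).getD j d = g j := by
  rw [pvGetDMap _ _ _ _ (by simpa using h)]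
  simp

-- mask of a residue is itself
theorem pvAndMod (m x : Nat) : (2 ^ m - 1) &&& (x % 2 ^ m) = x % 2 ^ m := by
  apply Nat.eq_of_testBit_eq
  intro i
  simp only [Nat.testBit_land, Nat.testBit_two_pow_sub_one, Nat.testBit_mod_two_pow]
  by_cases hi : i < m <;> simp [hi]

-- residue of a nonnegative int
theorem pvPosEmod (a : Int) (ha : 0 ≤ a) (p : Nat) :
    (a % ((p : Nat) : Int)).toNat = a.toNat % p := by
  conv_lhs => rw [← Int.toNat_of_nonneg ha]
  norm_cast

-- the master bit lemma: (a | b) & (2^m - 1) = (a mod 2^m) | (b mod 2^m)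
theorem pvMask (m : Nat) (a b : Int) :
    PySem.Int.band (PySem.Int.bor a b) (((2 ^ m - 1 : Nat) : Int)) =
      (((a % ((2 ^ m : Nat) : Int)).toNat ||| (b % ((2 ^ m : Nat) : Int)).toNat : Nat) : Int) := by
  have hp : 0 < 2 ^ m := Nat.two_pow_pos m
  by_cases ha : 0 ≤ a <;> by_cases hb : 0 ≤ b
  · -- both nonneg
    have e1 : PySem.Int.bor a b = ((a.toNat ||| b.toNat : Nat) : Int) := by
      simp only [PySem.Int.bor, if_pos ha, if_pos hb]
    have e2 : PySem.Int.band ((a.toNat ||| b.toNat : Nat) : Int) (((2 ^ m - 1 : Nat) : Int))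
        = (((a.toNat ||| b.toNat) &&& (2 ^ m - 1) : Nat) : Int) := by
      simp only [PySem.Int.band, if_pos (Int.natCast_nonneg _), Int.toNat_natCast]
    rw [e1, e2, pvPosEmod a ha, pvPosEmod b hb]
    congr 1
    apply Nat.eq_of_testBit_eq
    intro i
    simp only [Nat.testBit_land, Nat.testBit_lor, Nat.testBit_two_pow_sub_one,
      Nat.testBit_mod_two_pow]
    by_cases hi : i < m <;> simp [hi]
  · -- a ≥ 0, b < 0
    have hB : (-b - 1) = (((-b - 1).toNat : Nat) : Int) := (Int.toNat_of_nonneg (by omega)).symm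
    set A := a.toNat with hA
    set B := (-b - 1).toNat with hBdef
    have e1 : PySem.Int.bor a b = -((B - (B &&& A) : Nat) : Int) - 1 := by
      simp only [PySem.Int.bor, if_pos ha, if_neg hb]
      rfl
    rw [pvSubAnd] at e1
    have e2 : PySem.Int.band (-((Nat.ldiff B A : Nat) : Int) - 1) (((2 ^ m - 1 : Nat) : Int))
        = ((Nat.ldiff (2 ^ m - 1) (Nat.ldiff B A) : Nat) : Int) := by
      have hneg : ¬ (0 : Int) ≤ -((Nat.ldiff B A : Nat) : Int) - 1 := by
        have := Int.natCast_nonneg (Nat.ldiff B A); omega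
      simp only [PySem.Int.band, if_neg hneg, if_pos (Int.natCast_nonneg _), Int.toNat_natCast]
      rw [show -(-((Nat.ldiff B A : Nat) : Int) - 1) - 1 = ((Nat.ldiff B A : Nat) : Int) by ring,
        Int.toNat_natCast, pvSubAnd]
    have hbv : b = -(B : Int) - 1 := by omega
    rw [e1, e2, pvPosEmod a ha, hbv, pvNegEmod B (2 ^ m) hp,
      show 2 ^ m - 1 - B % 2 ^ m = 2 ^ m - 1 - ((2 ^ m - 1) &&& (B % 2 ^ m)) by rw [pvAndMod],
      pvSubAnd]
    congr 1
    apply Nat.eq_of_testBit_eq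
    intro i
    simp only [Nat.testBit_ldiff, Nat.testBit_lor,
      Nat.testBit_two_pow_sub_one, Nat.testBit_mod_two_pow]
    by_cases hi : i < m
    · simp only [hi, decide_true, Bool.true_and]
      cases A.testBit i <;> cases B.testBit i <;> rfl
    · simp [hi]
  · -- a < 0, b ≥ 0
    have hA : (-a - 1) = (((-a - 1).toNat : Nat) : Int) := (Int.toNat_of_nonneg (by omega)).symm
    set B := b.toNat with hBdef
    set A := (-a - 1).toNat with hAdef
    have e1 : PySem.Int.bor a b = -((A - (A &&& B) : Nat) : Int) - 1 := by
      simp only [PySem.Int.bor, if_neg ha, if_pos hb]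
      rfl
    rw [pvSubAnd] at e1
    have e2 : PySem.Int.band (-((Nat.ldiff A B : Nat) : Int) - 1) (((2 ^ m - 1 : Nat) : Int))
        = ((Nat.ldiff (2 ^ m - 1) (Nat.ldiff A B) : Nat) : Int) := by
      have hneg : ¬ (0 : Int) ≤ -((Nat.ldiff A B : Nat) : Int) - 1 := by
        have := Int.natCast_nonneg (Nat.ldiff A B); omega
      simp only [PySem.Int.band, if_neg hneg, if_pos (Int.natCast_nonneg _), Int.toNat_natCast]
      rw [show -(-((Nat.ldiff A B : Nat) : Int) - 1) - 1 = ((Nat.ldiff A B : Nat) : Int) by ring,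
        Int.toNat_natCast, pvSubAnd]
    have hav : a = -(A : Int) - 1 := by omega
    rw [e1, e2, pvPosEmod b hb, hav, pvNegEmod A (2 ^ m) hp,
      show 2 ^ m - 1 - A % 2 ^ m = 2 ^ m - 1 - ((2 ^ m - 1) &&& (A % 2 ^ m)) by rw [pvAndMod],
      pvSubAnd]
    congr 1
    apply Nat.eq_of_testBit_eq
    intro i
    simp only [Nat.testBit_ldiff, Nat.testBit_lor,
      Nat.testBit_two_pow_sub_one, Nat.testBit_mod_two_pow]
    by_cases hi : i < m
    · simp only [hi, decide_true, Bool.true_and]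
      cases A.testBit i <;> cases B.testBit i <;> rfl
    · simp [hi]
  · -- both negative
    set A := (-a - 1).toNat with hAdef
    set B := (-b - 1).toNat with hBdef
    have e1 : PySem.Int.bor a b = -((A &&& B : Nat) : Int) - 1 := by
      simp only [PySem.Int.bor, if_neg ha, if_neg hb]
      rfl
    have e2 : PySem.Int.band (-((A &&& B : Nat) : Int) - 1) (((2 ^ m - 1 : Nat) : Int))
        = ((Nat.ldiff (2 ^ m - 1) (A &&& B) : Nat) : Int) := by
      have hneg : ¬ (0 : Int) ≤ -((A &&& B : Nat) : Int) - 1 := by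
        have := Int.natCast_nonneg (A &&& B); omega
      simp only [PySem.Int.band, if_neg hneg, if_pos (Int.natCast_nonneg _), Int.toNat_natCast]
      rw [show -(-((A &&& B : Nat) : Int) - 1) - 1 = ((A &&& B : Nat) : Int) by ring,
        Int.toNat_natCast, pvSubAnd]
    have hav : a = -(A : Int) - 1 := by omega
    have hbv : b = -(B : Int) - 1 := by omega
    rw [e1, e2, hav, hbv, pvNegEmod A (2 ^ m) hp, pvNegEmod B (2 ^ m) hp,
      show 2 ^ m - 1 - A % 2 ^ m = 2 ^ m - 1 - ((2 ^ m - 1) &&& (A % 2 ^ m)) by rw [pvAndMod],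
      show 2 ^ m - 1 - B % 2 ^ m = 2 ^ m - 1 - ((2 ^ m - 1) &&& (B % 2 ^ m)) by rw [pvAndMod],
      pvSubAnd, pvSubAnd]
    congr 1
    apply Nat.eq_of_testBit_eq
    intro i
    simp only [Nat.testBit_ldiff, Nat.testBit_land, Nat.testBit_lor,
      Nat.testBit_two_pow_sub_one, Nat.testBit_mod_two_pow]
    by_cases hi : i < m
    · simp only [hi, decide_true, Bool.true_and]
      cases A.testBit i <;> cases B.testBit i <;> rfl
    · simp [hi]

-- digits with the '0'-for-zero convention, padded to width m
theorem pvPadFull (m X : Nat) (h : X < 2 ^ m) (hm0 : 0 < m) :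
    List.replicate (m - (if X = 0 then ['0'] else pvBin X).length) '0' ++
        (if X = 0 then ['0'] else pvBin X) =
      (List.range m).map (fun l => if X.testBit (m - 1 - l) then '1' else '0') := by
  by_cases hX : X = 0
  · subst hX
    rw [show (if (0:Nat) = 0 then ['0'] else pvBin 0) = ['0'] from rfl]
    simp only [Nat.zero_testBit, List.length_singleton, Bool.false_eq_true, if_false]
    rw [List.map_const', List.length_range]
    conv_rhs => rw [show m = m - 1 + 1 by omega, List.replicate_succ']
  · rw [if_neg hX]
    exact pvPad m X h

-- the branch test A performs on matrix entries, in terms of the stored bits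
theorem pvCharEq (ta tb : Bool) :
    (if ((if ta then (1:Int) else 0) == 1 || (if tb then (1:Int) else 0) == 1) = true then '#' else ' ')
      = (if (ta || tb) = true then '#' else ' ') := by
  cases ta <;> cases tb <;> rfl

-- the two character translations agree pointwise
theorem pvTranslate (m X : Nat) :
    ((List.range m).map (fun l => if X.testBit (m - 1 - l) then '1' else '0')).map
        (fun c => if c = '1' then '#' else ' ') =
      (List.range m).map (fun l => if X.testBit (m - 1 - l) then '#' else ' ') := by
  rw [List.map_map]
  apply List.map_congr_left
  intro l _
  by_cases hb : X.testBit (m - 1 - l) <;> simp [hb]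

-- ===== VERDICT (by name: the statement is the Claim_ definition above) =====
theorem solution_spec : Claim_equal_solution := by
  intro n arr1 arr2 _ hpre
  unfold Spec_solution solution solution_alt
  by_cases hn : n ≤ 0
  · rw [PySem.List.pyRange_one_eq_nil hn]
    simp
  · replace hn : 0 < n := by omega
    obtain ⟨h1, h2⟩ := hpre hn
    have hm : n = (n.toNat : Int) := by omega
    set m := n.toNat with hmdef
    have hm0 : 0 < m := by omega
    have hlen1 : m ≤ arr1.length := by omega
    have hlen2 : m ≤ arr2.length := by omega
    rw [hm]
    dsimp only
    simp only [PySem.List.foldl_append_singleton_eq_map, List.nil_append]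
    apply List.map_congr_left
    intro k hk
    rw [PySem.List.mem_pyRange_one] at hk
    have hkj : k = ((k.toNat : Nat) : Int) := by omega
    set j := k.toNat with hjdef
    have hjm : j < m := by omega
    have hj1 : j < arr1.length := by omega
    have hj2 : j < arr2.length := by omega
    rw [hkj]
    rw [pvStrLoop]
    -- the two rows of A's bit matrices at index j
    have hrowfun : ∀ i : Int,
        (PySem.List.slice? (pvBitRow ((m : Nat) : Int) i) none none (-1)).getD [] =
          (List.range m).map
            (fun l => if ((i % ((2 ^ m : Nat) : Int)).toNat).testBit (m - 1 - l) then (1 : Int) else 0) := by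
      intro i
      rw [PySem.List.slice?_none_none_neg_one, Option.getD_some, pvBitRow_eq, Int.toNat_natCast,
        pvLow_eq_pvLowN, pvLowN_testBit, pvReverseMapRange]
    have hrow1 : PySem.List.pyGetD
        (arr1.map (fun i => (PySem.List.slice? (pvBitRow ((m : Nat) : Int) i) none none (-1)).getD []))
        ((j : Nat) : Int) [] =
        (List.range m).map
          (fun l => if ((arr1[j] % ((2 ^ m : Nat) : Int)).toNat).testBit (m - 1 - l) then (1 : Int) else 0) := by
      rw [PySem.List.pyGetD_natCast, pvGetDMap _ _ _ _ hj1, hrowfun]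
    have hrow2 : PySem.List.pyGetD
        (arr2.map (fun i => (PySem.List.slice? (pvBitRow ((m : Nat) : Int) i) none none (-1)).getD []))
        ((j : Nat) : Int) [] =
        (List.range m).map
          (fun l => if ((arr2[j] % ((2 ^ m : Nat) : Int)).toNat).testBit (m - 1 - l) then (1 : Int) else 0) := by
      rw [PySem.List.pyGetD_natCast, pvGetDMap _ _ _ _ hj2, hrowfun]
    simp only [hrow1, hrow2]
    -- B's side: fetch, or, mask
    have e1 : PySem.List.pyGetD arr1 ((j : Nat) : Int) 0 = arr1[j] := by
      rw [PySem.List.pyGetD_natCast, List.getD_eq_getElem _ _ hj1]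
    have e2 : PySem.List.pyGetD arr2 ((j : Nat) : Int) 0 = arr2[j] := by
      rw [PySem.List.pyGetD_natCast, List.getD_eq_getElem _ _ hj2]
    have hshift : ((1 <<< m : Nat) : Int) - 1 = ((2 ^ m - 1 : Nat) : Int) := by
      rw [Nat.shiftLeft_eq, one_mul, Nat.cast_sub Nat.one_le_two_pow, Nat.cast_one]
    simp only [e1, e2, hshift, pvMask m, Nat.cast_eq_zero, Int.toNat_natCast]
    have hpos : (0:Int) < ((2 ^ m : Nat) : Int) := by positivity
    have hxa : (arr1[j] % ((2 ^ m : Nat) : Int)).toNat < 2 ^ m := by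
      have h1 := Int.emod_nonneg arr1[j] (by omega : ((2 ^ m : Nat) : Int) ≠ 0)
      have h2 := Int.emod_lt_of_pos arr1[j] hpos
      omega
    have hxb : (arr2[j] % ((2 ^ m : Nat) : Int)).toNat < 2 ^ m := by
      have h1 := Int.emod_nonneg arr2[j] (by omega : ((2 ^ m : Nat) : Int) ≠ 0)
      have h2 := Int.emod_lt_of_pos arr2[j] hpos
      omega
    rw [pvPadFull m _ (Nat.or_lt_two_pow hxa hxb) hm0, pvTranslate m]
    congr 1
    apply List.map_congr_left
    intro l hl
    rw [List.mem_range] at hl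
    have g1 : PySem.List.pyGetD
        ((List.range m).map (fun t => if ((arr1[j] % ((2 ^ m : Nat) : Int)).toNat).testBit (m - 1 - t) then (1 : Int) else 0))
        ((l : Nat) : Int) 0 =
        (if ((arr1[j] % ((2 ^ m : Nat) : Int)).toNat).testBit (m - 1 - l) then (1 : Int) else 0) := by
      rw [PySem.List.pyGetD_natCast, pvGetDMapRange _ _ _ _ hl]
    have g2 : PySem.List.pyGetD
        ((List.range m).map (fun t => if ((arr2[j] % ((2 ^ m : Nat) : Int)).toNat).testBit (m - 1 - t) then (1 : Int) else 0))
        ((l : Nat) : Int) 0 =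
        (if ((arr2[j] % ((2 ^ m : Nat) : Int)).toNat).testBit (m - 1 - l) then (1 : Int) else 0) := by
      rw [PySem.List.pyGetD_natCast, pvGetDMapRange _ _ _ _ hl]
    rw [g1, g2, Nat.testBit_lor, pvCharEq]
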